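-- pv_equiv track=rewrite | github.com/HeWeMel/adventofcode | 2023/day13.py | find_x_mirror
-- ===== SOURCE A (Python) =====
-- def find_x_mirror(a: list[str], smudge_count: int):
--     size_y = len(a)
--     size_x = len(a[0])
--     for column in range(1, size_x):  # mirror left of this column?
--         if smudge_count == sum(
--                 1 if a[row][column - width - 1] != a[row][column + width] else 0
--                 for width in range(min(column, size_x - column))
--                 for row in range(0, size_y)
--         ):
--             return column
--     return 0
-- ===== SOURCE B (Python) =====
-- def find_x_mirror(a: list[str], smudge_count: int):
--     size_x = len(a[0])
--     cols = ["".join(row[j] for row in a) for j in range(size_x)]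
--     uniq = []
--     for col in cols:
--         if col not in uniq:
--             uniq.append(col)
--     dist = [[sum(x != y for x, y in zip(u, v)) for v in uniq] for u in uniq]
--     col_id = [uniq.index(col) for col in cols]
--     for c in range(1, size_x):
--         if smudge_count == sum(dist[col_id[c - 1 - w]][col_id[c + w]]
--                                for w in range(min(c, size_x - c))):
--             return c
--     return 0
-- ===== Notes on version B (the rewrite author's own statement) =====
-- stated objective: alternative
-- what changed: B deduplicates the columns into a list of distinct columns, precomputes the Hamming-distance table between all distinct columns once, and answers each mirror candidate by summing table lookups, so the per-candidate character/row rescans of A disappear.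
-- outside the precondition, e.g. on find_x_mirror(['a', ''], 0): A returns 0, B raises IndexError; on find_x_mirror(['aab', 'aa'], 0): A returns 1, B raises IndexError
import Mathlib
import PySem

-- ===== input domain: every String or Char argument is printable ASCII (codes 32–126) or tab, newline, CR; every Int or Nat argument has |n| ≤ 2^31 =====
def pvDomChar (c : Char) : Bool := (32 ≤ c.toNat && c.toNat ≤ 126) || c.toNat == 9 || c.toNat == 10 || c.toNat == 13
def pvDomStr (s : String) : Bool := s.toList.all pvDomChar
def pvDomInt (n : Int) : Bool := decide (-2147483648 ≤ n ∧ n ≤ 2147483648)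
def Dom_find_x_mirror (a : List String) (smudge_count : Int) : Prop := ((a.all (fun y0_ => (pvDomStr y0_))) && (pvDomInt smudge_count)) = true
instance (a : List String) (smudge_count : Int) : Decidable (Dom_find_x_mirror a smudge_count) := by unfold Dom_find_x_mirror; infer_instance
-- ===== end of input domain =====

-- B deduplicates the columns, precomputes the Hamming-distance table between distinct columns once,
-- and answers each mirror candidate by table lookups instead of A's per-candidate (width,row) rescan
-- (alternative algorithm, same worst-case cost). Pre_ excludes ragged/empty grids on which A usually raises.


-- ===== PORT A =====
-- 1 if a[row][column - width - 1] != a[row][column + width] else 0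
def pvIndA (a : List String) (c w r : Int) : Int :=
  if PySem.Str.pyGet? (PySem.List.pyGetD a r "") (c - w - 1) ≠
     PySem.Str.pyGet? (PySem.List.pyGetD a r "") (c + w) then 1 else 0

-- sum( … for width in range(min(column, size_x - column)) for row in range(0, size_y) )
def pvSumA (a : List String) (sizeX c : Int) : Int :=
  ((PySem.List.pyRange 0 (min c (sizeX - c)) 1).flatMap (fun w =>
    (PySem.List.pyRange 0 (a.length : Int) 1).map (fun r => pvIndA a c w r))).sum

-- for column in range(1, size_x): if smudge_count == sum(…): return column / return 0
def pvLoopA (a : List String) (smudge_count sizeX : Int) : List Int → Int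
  | [] => 0
  | c :: rest => if smudge_count = pvSumA a sizeX c then c else pvLoopA a smudge_count sizeX rest

def find_x_mirror (a : List String) (smudge_count : Int) : Int :=
  let sizeX : Int := PySem.Str.len (PySem.List.pyGetD a 0 "")
  pvLoopA a smudge_count sizeX (PySem.List.pyRange 1 sizeX 1)

-- ===== PORT B =====
-- cols = ["".join(row[j] for row in a) for j in range(size_x)]
-- (row[j] is in range for every admitted grid, so pyGetD's default ' ' is never used)
def pvColsB (a : List String) (sizeX : Int) : List String :=
  (PySem.List.pyRange 0 sizeX 1).map (fun j =>
    String.ofList (a.map (fun row => PySem.List.pyGetD row.toList j ' ')))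

-- for col in cols: if col not in uniq: uniq.append(col)
def pvUniq (cols : List String) : List String :=
  cols.foldl (fun u col => if col ∈ u then u else u ++ [col]) []

-- sum(x != y for x, y in zip(u, v))
def pvHamB (u v : String) : Int :=
  ((u.toList.zip v.toList).map (fun q => if q.1 ≠ q.2 then (1 : Int) else 0)).sum

-- dist = [[… for v in uniq] for u in uniq]
def pvDist (uniq : List String) : List (List Int) :=
  uniq.map (fun u => uniq.map (fun v => pvHamB u v))

-- col_id = [uniq.index(col) for col in cols]  (each col ∈ uniq, so ValueError is impossible;
-- index? is exact, the getD default 0 is never used)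
def pvColId (uniq cols : List String) : List Int :=
  cols.map (fun col => ((PySem.List.index? uniq col).getD 0 : Nat))

-- dist[col_id[c-1-w]][col_id[c+w]]  (indices in range; pyGetD defaults never used)
def pvSumB (dist : List (List Int)) (colId : List Int) (sizeX c : Int) : Int :=
  ((PySem.List.pyRange 0 (min c (sizeX - c)) 1).map (fun w =>
    PySem.List.pyGetD
      (PySem.List.pyGetD dist (PySem.List.pyGetD colId (c - 1 - w) 0) [])
      (PySem.List.pyGetD colId (c + w) 0) 0)).sum

def pvLoopB (dist : List (List Int)) (colId : List Int) (smudge_count sizeX : Int) : List Int → Int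
  | [] => 0
  | c :: rest => if smudge_count = pvSumB dist colId sizeX c then c
                 else pvLoopB dist colId smudge_count sizeX rest

def find_x_mirror_alt (a : List String) (smudge_count : Int) : Int :=
  let sizeX : Int := PySem.Str.len (PySem.List.pyGetD a 0 "")
  let cols := pvColsB a sizeX
  let uniq := pvUniq cols
  let dist := pvDist uniq
  let colId := pvColId uniq cols
  pvLoopB dist colId smudge_count sizeX (PySem.List.pyRange 1 sizeX 1)

-- ===== PRECONDITION & SPEC =====
-- Pre_ excludes the empty grid (A raises IndexError on a[0]) and ragged grids with a row shorter than
-- a[0] (A raises IndexError on most of them; on the few where an early candidate returns first, or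
-- where size_x <= 1, A still returns — see the cites — but B's column transpose naturally raises there).
def Pre_find_x_mirror (a : List String) (smudge_count : Int) : Prop :=
  a ≠ [] ∧ ∀ s ∈ a, (PySem.List.pyGetD a 0 "").toList.length ≤ s.toList.length
instance (a : List String) (smudge_count : Int) : Decidable (Pre_find_x_mirror a smudge_count) := by
  unfold Pre_find_x_mirror; infer_instance

def pvWitness_find_x_mirror : List String × Int := (["#.#", "###"], 1)

def Spec_find_x_mirror (a : List String) (smudge_count : Int) (out : Int) : Prop := out = find_x_mirror_alt a smudge_count
instance (a : List String) (smudge_count : Int) (out : Int) : Decidable (Spec_find_x_mirror a smudge_count out) := by unfold Spec_find_x_mirror; infer_instance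

-- ===== CLAIM (what is proved, stated in full; the proofs are below) =====
def Claim_equal_find_x_mirror : Prop := ∀ (a : List String) (smudge_count : Int), Dom_find_x_mirror a smudge_count → Pre_find_x_mirror a smudge_count → Spec_find_x_mirror a smudge_count (find_x_mirror a smudge_count)

-- ===== LEMMAS AND PROOFS =====

-- a column of the grid, as B's transpose produces it
def pvColF (a : List String) (j : Int) : List Char :=
  a.map (fun row => PySem.List.pyGetD row.toList j ' ')

-- A's Option-level character comparison agrees with the default-level one at in-range indices
theorem pv_ind_eq (row : String) (L : Nat) (hrow : L ≤ row.toList.length) (i j : Int)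
    (hi : 0 ≤ i) (hi2 : i < (L : Int)) (hj : 0 ≤ j) (hj2 : j < (L : Int)) :
    (if PySem.Str.pyGet? row i ≠ PySem.Str.pyGet? row j then (1 : Int) else 0)
    = (if PySem.List.pyGetD row.toList i ' ' ≠ PySem.List.pyGetD row.toList j ' ' then (1 : Int) else 0) := by
  obtain ⟨ni, rfl⟩ := Int.eq_ofNat_of_zero_le hi
  obtain ⟨nj, rfl⟩ := Int.eq_ofNat_of_zero_le hj
  have h1 : ni < row.toList.length := by omega
  have h2 : nj < row.toList.length := by omega
  simp [PySem.List.pyGetD_natCast, List.getElem?_eq_getElem h1,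
        List.getElem?_eq_getElem h2, List.getD_eq_getElem?_getD]

-- B's flat mismatch count over one column pair is a row sum
theorem pv_ham_eq (a : List String) (i j : Int) :
    pvHamB (String.ofList (pvColF a i)) (String.ofList (pvColF a j))
    = (a.map (fun row =>
        if PySem.List.pyGetD row.toList i ' ' ≠ PySem.List.pyGetD row.toList j ' '
        then (1 : Int) else 0)).sum := by
  simp only [pvHamB, pvColF, String.toList_ofList, List.zip_map', List.map_map]
  rfl

-- A's inner row sum, factored through the rows themselves
theorem pv_rowsum_eq (a : List String) (c w : Int) :
    ((PySem.List.pyRange 0 (a.length : Int) 1).map (fun r => pvIndA a c w r)).sum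
    = (a.map (fun row =>
        if PySem.Str.pyGet? row (c - w - 1) ≠ PySem.Str.pyGet? row (c + w)
        then (1 : Int) else 0)).sum := by
  rw [show (fun r => pvIndA a c w r)
        = (fun row => if PySem.Str.pyGet? row (c - w - 1) ≠ PySem.Str.pyGet? row (c + w)
            then (1 : Int) else 0) ∘ (fun r => PySem.List.pyGetD a r "") from rfl,
      ← List.map_map, PySem.List.map_pyGetD_pyRange_zero']

-- every processed element ends up in the fold's accumulator
theorem pv_mem_uniq (cols : List String) (x : String) (hx : x ∈ cols) : x ∈ pvUniq cols := by
  suffices h : ∀ (l : List String) (u : List String), x ∈ l ∨ x ∈ u →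
      x ∈ l.foldl (fun u col => if col ∈ u then u else u ++ [col]) u by
    exact h cols [] (Or.inl hx)
  intro l
  induction l with
  | nil => intro u h; simpa using h
  | cons c rest ih =>
    intro u h
    simp only [List.foldl_cons]
    by_cases hc : c ∈ u <;> simp only [hc, if_true, if_false] <;> apply ih
    · rcases h with h | h
      · rcases List.mem_cons.mp h with rfl | h
        · exact Or.inr hc
        · exact Or.inl h
      · exact Or.inr h
    · rcases h with h | h
      · rcases List.mem_cons.mp h with rfl | h
        · exact Or.inr (by simp)
        · exact Or.inl h
      · exact Or.inr (by simp [h])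

-- the table lookup at (id p, id q) is the Hamming distance of cols[p] and cols[q]
theorem pv_lookup_eq (cols : List String) (p q : Nat) (hp : p < cols.length) (hq : q < cols.length) :
    PySem.List.pyGetD
      (PySem.List.pyGetD (pvDist (pvUniq cols))
        (PySem.List.pyGetD (pvColId (pvUniq cols) cols) (p : Int) 0) [])
      (PySem.List.pyGetD (pvColId (pvUniq cols) cols) (q : Int) 0) 0
    = pvHamB cols[p] cols[q] := by
  have key : ∀ (r : Nat) (hr : r < cols.length),
      PySem.List.pyGetD (pvColId (pvUniq cols) cols) (r : Int) 0
        = (((pvUniq cols).idxOf cols[r] : Nat) : Int) ∧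
      (pvUniq cols).idxOf cols[r] < (pvUniq cols).length ∧
      (pvUniq cols)[(pvUniq cols).idxOf cols[r]]'(List.idxOf_lt_length_of_mem
        (pv_mem_uniq cols cols[r] (List.getElem_mem hr))) = cols[r] := by
    intro r hr
    have hmem : cols[r] ∈ pvUniq cols := pv_mem_uniq cols cols[r] (List.getElem_mem hr)
    have hlt := List.idxOf_lt_length_of_mem hmem
    obtain ⟨k, hk⟩ := Option.isSome_iff_exists.mp
      ((PySem.List.index?_isSome_iff (pvUniq cols) cols[r]).mpr hmem)
    have hk' : (pvUniq cols).idxOf? cols[r] = some k := by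
      rw [← PySem.List.index?_eq_idxOf?]; exact hk
    have hidx : (pvUniq cols).idxOf cols[r] = k := by
      rw [List.idxOf_eq_getD_idxOf?, hk']; rfl
    refine ⟨?_, hlt, List.getElem_idxOf hlt⟩
    simp only [pvColId, PySem.List.pyGetD_natCast, List.getD_eq_getElem?_getD,
      List.getElem?_map, List.getElem?_eq_getElem hr]
    simp [hk', hidx]
  obtain ⟨hp1, hp2, hp3⟩ := key p hp
  obtain ⟨hq1, hq2, hq3⟩ := key q hq
  rw [hp1, hq1]
  simp only [pvDist, PySem.List.pyGetD_natCast, List.getD_eq_getElem?_getD,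
    List.getElem?_map, List.getElem?_eq_getElem hp2, List.getElem?_eq_getElem hq2,
    Option.map_some, Option.getD_some, hp3, hq3]

-- the per-candidate counts of A and B agree
theorem pv_key (a : List String) (L : Nat) (hpre2 : ∀ s ∈ a, L ≤ s.toList.length)
    (c : Int) (hc1 : 1 ≤ c) (hc2 : c < (L : Int)) :
    pvSumA a (L : Int) c
      = pvSumB (pvDist (pvUniq (pvColsB a (L : Int)))) (pvColId (pvUniq (pvColsB a (L : Int))) (pvColsB a (L : Int))) (L : Int) c := by
  have hclen : (pvColsB a (L : Int)).length = L := by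
    simp [pvColsB, PySem.List.length_pyRange_one]
  have hcget : ∀ (i : Nat) (h : i < L), (pvColsB a (L : Int))[i]'(by omega) = String.ofList (pvColF a (i : Int)) := by
    intro i h
    simp [pvColsB, PySem.List.getElem_pyRange_one, pvColF]
  rw [pvSumA, pvSumB, List.flatMap_def, List.sum_flatten, List.map_map]
  apply congrArg
  apply List.map_congr_left
  intro w hw
  rw [PySem.List.mem_pyRange_one] at hw
  obtain ⟨nw, rfl⟩ := Int.eq_ofNat_of_zero_le hw.1
  have hwm : (nw : Int) < min c ((L : Int) - c) := hw.2
  simp only [Function.comp]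
  have hp : (c - 1 - (nw : Int)).toNat < (pvColsB a (L : Int)).length := by rw [hclen]; omega
  have hq : (c + (nw : Int)).toNat < (pvColsB a (L : Int)).length := by rw [hclen]; omega
  have e1 : c - 1 - (nw : Int) = (((c - 1 - (nw : Int)).toNat : Nat) : Int) := by omega
  have e2 : c + (nw : Int) = (((c + (nw : Int)).toNat : Nat) : Int) := by omega
  rw [pv_rowsum_eq, e1, e2, pv_lookup_eq _ _ _ hp hq,
      hcget _ (by omega), hcget _ (by omega), ← e1, ← e2]
  rw [show c - (nw : Int) - 1 = c - 1 - (nw : Int) by ring] at *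
  rw [pv_ham_eq]
  apply congrArg
  apply List.map_congr_left
  intro row hrow
  have hL : L ≤ row.toList.length := hpre2 row hrow
  exact pv_ind_eq row L hL _ _ (by omega) (by omega) (by omega) (by omega)

theorem pv_loops_eq (a : List String) (dist : List (List Int)) (colId : List Int)
    (sc sizeX : Int) (l : List Int)
    (h : ∀ c ∈ l, pvSumA a sizeX c = pvSumB dist colId sizeX c) :
    pvLoopA a sc sizeX l = pvLoopB dist colId sc sizeX l := by
  induction l with
  | nil => rfl
  | cons c rest ih =>
    simp only [pvLoopA, pvLoopB, h c (by simp)]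
    split <;> [rfl; exact ih (fun x hx => h x (by simp [hx]))]

-- ===== VERDICT (by name: the statement is the Claim_ definition above) =====
theorem find_x_mirror_spec : Claim_equal_find_x_mirror := by
  intro a sc _hdom hpre
  unfold Spec_find_x_mirror find_x_mirror find_x_mirror_alt
  have hlen : PySem.Str.len (PySem.List.pyGetD a 0 "")
      = (((PySem.List.pyGetD a 0 "").toList.length : Nat) : Int) := by
    simp [pysem]
  rw [hlen]
  apply pv_loops_eq
  intro c hc
  rw [PySem.List.mem_pyRange_one] at hc
  exact pv_key a _ hpre.2 c hc.1 hc.2
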